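-- pv_equiv track=rewrite | github.com/tongxiangzheng/dnfC | src/SourcesListManager.py | parseRPMSources
-- ===== SOURCE A (Python) =====
-- def parseRPMSources(data):
-- 	name=None
-- 	baseurl=None
-- 	enabled='1'
-- 	res=[]
-- 	for info in data:
-- 		info=info.split('#',1)[0].strip()
-- 		if len(info)==0:
-- 			continue
-- 		if info.startswith('['):
-- 			if name is not None:
-- 				if not name.endswith('-source'):
-- 					if enabled=='1':
-- 						res.append((name,baseurl))
-- 			name=info[1:-1]
-- 			baseurl=None
-- 			enabled='1'
-- 		elif info.startswith('baseurl'):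
-- 			baseurl=info.split('=',1)[1].strip()
-- 		elif info.startswith('enabled'):
-- 			enabled=info.split('=',1)[1].strip()
-- 	if name is not None:
-- 		if not name.endswith('-source'):
-- 			if enabled=='1':
-- 				res.append((name,baseurl))
-- 	return res
-- ===== SOURCE B (Python) =====
-- def parseRPMSources(data):
-- 	cleaned = [c for c in (line.split('#', 1)[0].strip() for line in data) if c]
-- 	res = []
-- 	i = _headerIndex(cleaned, 0)
-- 	while i < len(cleaned):
-- 		name = cleaned[i][1:-1]
-- 		j = _headerIndex(cleaned, i + 1)
-- 		body = cleaned[i + 1:j]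
-- 		if not name.endswith('-source') and _lastValue(body, 'enabled', '1') == '1':
-- 			res.append((name, _lastValue(body, 'baseurl', None)))
-- 		i = j
-- 	return res
--
-- def _headerIndex(lines, i):
-- 	while i < len(lines) and not lines[i].startswith('['):
-- 		i += 1
-- 	return i
--
-- def _lastValue(body, key, default):
-- 	for c in reversed(body):
-- 		if c.startswith(key):
-- 			return c.split('=', 1)[1].strip()
-- 	return default
-- ===== Notes on version B (the rewrite author's own statement) =====
-- stated objective: simpler
-- what changed: Replaces A's single stateful loop (carrying name/baseurl/enabled across lines with a duplicated flush block at each header and at EOF) by a two-phase scan: clean the lines once, then walk header to header, extracting each section's last baseurl=/enabled= line by a back-to-front search of its body.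
import Mathlib
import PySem

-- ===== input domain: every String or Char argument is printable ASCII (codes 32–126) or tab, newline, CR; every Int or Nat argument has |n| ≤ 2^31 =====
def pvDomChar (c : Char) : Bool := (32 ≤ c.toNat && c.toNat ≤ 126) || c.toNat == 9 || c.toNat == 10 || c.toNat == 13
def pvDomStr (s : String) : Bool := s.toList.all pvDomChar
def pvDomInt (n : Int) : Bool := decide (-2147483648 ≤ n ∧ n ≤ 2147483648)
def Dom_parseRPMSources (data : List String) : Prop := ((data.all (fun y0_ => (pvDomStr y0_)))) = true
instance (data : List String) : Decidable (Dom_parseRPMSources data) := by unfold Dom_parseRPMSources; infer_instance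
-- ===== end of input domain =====

-- B replaces A's single accumulator loop with duplicated flush logic by a section-at-a-time
-- scan: find each '[' header, search its body back-to-front for the last baseurl=/enabled= line
-- (objective: simpler decomposition; same cost).

-- shared helpers: both Pythons contain literally these expressions
-- info.split('#',1)[0].strip()
def pvClean (s : String) : String :=
  PySem.Str.strip (((PySem.Str.splitMax? s "#" 1).getD []).headD "")
-- info.split('=',1)[1].strip(); total via getD "" — the none case is exactly where the
-- Python raises IndexError, and Pre_ excludes those inputs
def pvEqTail (s : String) : String :=
  PySem.Str.strip ((PySem.List.pyGet? ((PySem.Str.splitMax? s "=" 1).getD []) 1).getD "")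

-- ===== PORT A =====
-- state = (name?, baseurl?, enabled, res)
def pvStateA := Option String × Option String × String × List (String × Option String)

def pvStepA (st : pvStateA) (line : String) : pvStateA :=
  let info := pvClean line
  if PySem.Str.len info == 0 then st
  else if PySem.Str.startswith info "[" then
    let res :=
      match st.1 with
      | some name =>
        if !(PySem.Str.endswith name "-source") then
          if st.2.2.1 == "1" then st.2.2.2 ++ [(name, st.2.1)] else st.2.2.2
        else st.2.2.2
      | none => st.2.2.2
    (some (PySem.Str.slice info (some 1) (some (-1))), none, "1", res)
  else if PySem.Str.startswith info "baseurl" then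
    (st.1, some (pvEqTail info), st.2.2.1, st.2.2.2)
  else if PySem.Str.startswith info "enabled" then
    (st.1, st.2.1, pvEqTail info, st.2.2.2)
  else st

def parseRPMSources (data : List String) : List (String × Option String) :=
  let st := data.foldl pvStepA (none, none, "1", [])
  match st.1 with
  | some name =>
    if !(PySem.Str.endswith name "-source") then
      if st.2.2.1 == "1" then st.2.2.2 ++ [(name, st.2.1)] else st.2.2.2
    else st.2.2.2
  | none => st.2.2.2

-- ===== PORT B =====
-- _lastValue(body, key, default): first match scanning the body back-to-front
def pvLastValue (body : List String) (key : String) (dflt : Option String) : Option String :=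
  match body.reverse.find? (fun c => PySem.Str.startswith c key) with
  | some c => some (pvEqTail c)
  | none => dflt

-- the while-loop over header positions: each step consumes one header plus its body
-- (_headerIndex's scan to the next '[' line is List.takeWhile/dropWhile of the suffix)
def pvSections : List String → List (String × Option String)
  | [] => []
  | hdr :: rest =>
    let body := rest.takeWhile (fun c => !(PySem.Str.startswith c "["))
    let rest' := rest.dropWhile (fun c => !(PySem.Str.startswith c "["))
    let name := PySem.Str.slice hdr (some 1) (some (-1))
    let tailRes := pvSections rest'
    if !(PySem.Str.endswith name "-source") &&
       (pvLastValue body "enabled" (some "1") == some "1") then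
      (name, pvLastValue body "baseurl" none) :: tailRes
    else tailRes
  termination_by l => l.length
  decreasing_by
    simpa using Nat.lt_succ_of_le (List.length_dropWhile_le _ _)

def parseRPMSources_alt (data : List String) : List (String × Option String) :=
  let cleaned := (data.map pvClean).filter (fun c => c ≠ "")
  pvSections (cleaned.dropWhile (fun c => !(PySem.Str.startswith c "[")))

-- ===== PRECONDITION & SPEC =====
-- Pre_ excludes exactly the inputs on which Python A raises IndexError: a line that, after
-- comment-stripping, starts with 'baseurl' or 'enabled' (and is not a '[' header) but
-- contains no '=' to split on.
def Pre_parseRPMSources (data : List String) : Prop :=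
  (data.all (fun line =>
    let c := pvClean line
    PySem.Str.startswith c "[" ||
    (!(PySem.Str.startswith c "baseurl") && !(PySem.Str.startswith c "enabled")) ||
    PySem.Str.isIn "=" c)) = true
instance (data : List String) : Decidable (Pre_parseRPMSources data) := by
  unfold Pre_parseRPMSources; infer_instance

def pvWitness_parseRPMSources : List String :=
  ["[main]", "baseurl = http://x # mirror", "enabled=1", "", "[extra-source]", "enabled=1"]

def Spec_parseRPMSources (data : List String) (out : List (String × Option String)) : Prop := out = parseRPMSources_alt data
instance (data : List String) (out : List (String × Option String)) : Decidable (Spec_parseRPMSources data out) := by unfold Spec_parseRPMSources; infer_instance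

-- ===== CLAIM (what is proved, stated in full; the proofs are below) =====
def Claim_equal_parseRPMSources : Prop := ∀ (data : List String), Dom_parseRPMSources data → Pre_parseRPMSources data → Spec_parseRPMSources data (parseRPMSources data)

-- ===== LEMMAS AND PROOFS =====
def pvStepC (st : pvStateA) (info : String) : pvStateA :=
  if PySem.Str.len info == 0 then st
  else if PySem.Str.startswith info "[" then
    let res :=
      match st.1 with
      | some name =>
        if !(PySem.Str.endswith name "-source") then
          if st.2.2.1 == "1" then st.2.2.2 ++ [(name, st.2.1)] else st.2.2.2
        else st.2.2.2
      | none => st.2.2.2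
    (some (PySem.Str.slice info (some 1) (some (-1))), none, "1", res)
  else if PySem.Str.startswith info "baseurl" then
    (st.1, some (pvEqTail info), st.2.2.1, st.2.2.2)
  else if PySem.Str.startswith info "enabled" then
    (st.1, st.2.1, pvEqTail info, st.2.2.2)
  else st

def pvEmit (n : String) (b : Option String) (e : String) : List (String × Option String) :=
  if !(PySem.Str.endswith n "-source") && (e == "1") then [(n, b)] else []

def pvFinish (st : pvStateA) : List (String × Option String) :=
  match st.1 with
  | some n => st.2.2.2 ++ pvEmit n st.2.1 st.2.2.1
  | none => st.2.2.2

def pvLastStr (body : List String) (key : String) (d : String) : String :=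
  match body.reverse.find? (fun c => PySem.Str.startswith c key) with
  | some c => pvEqTail c
  | none => d

theorem pv_len_zero {c : String} (h : (PySem.Str.len c == 0) = true) : c = "" := by
  rw [beq_iff_eq] at h
  simp [PySem.Str.len_eq] at h
  exact h

theorem pvLastValue_nil (key : String) (d : Option String) : pvLastValue [] key d = d := rfl
theorem pvLastStr_nil (key : String) (d : String) : pvLastStr [] key d = d := rfl

theorem pvLastValue_cons (c : String) (t : List String) (key : String) (dflt : Option String) :
    pvLastValue (c :: t) key dflt =
      pvLastValue t key (if PySem.Str.startswith c key then some (pvEqTail c) else dflt) := by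
  unfold pvLastValue
  rw [List.reverse_cons, List.find?_append]
  cases h : t.reverse.find? (fun c => PySem.Str.startswith c key) with
  | some x => simp
  | none =>
    simp only [List.find?_cons, Option.none_or]
    cases hc : PySem.Chars.startswith c.toList key.toList <;> simp [hc]

theorem pvLastStr_cons (c : String) (t : List String) (key : String) (d : String) :
    pvLastStr (c :: t) key d =
      (if PySem.Str.startswith c key then pvLastStr t key (pvEqTail c)
       else pvLastStr t key d) := by
  unfold pvLastStr
  rw [List.reverse_cons, List.find?_append]
  cases h : t.reverse.find? (fun c => PySem.Str.startswith c key) with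
  | some x => simp
  | none =>
    simp only [List.find?_cons, Option.none_or]
    cases hc : PySem.Chars.startswith c.toList key.toList <;> simp [hc]

theorem pvLastValue_some (body : List String) (key : String) (d : String) :
    pvLastValue body key (some d) = some (pvLastStr body key d) := by
  unfold pvLastValue pvLastStr
  cases body.reverse.find? (fun c => PySem.Str.startswith c key) <;> rfl

theorem pv_flush (nm : String) (b : Option String) (e : String)
    (r : List (String × Option String)) :
    (if !(PySem.Str.endswith nm "-source") then
       if e == "1" then r ++ [(nm, b)] else r
     else r) = r ++ pvEmit nm b e := by
  unfold pvEmit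
  by_cases h2 : (e == "1") = true <;> (simp [h2]; try (split <;> simp))

theorem pv_disj {c : String} (h : PySem.Str.startswith c "baseurl" = true) :
    PySem.Str.startswith c "enabled" = false := by
  by_contra h2
  rw [Bool.not_eq_false] at h2
  simp only [PySem.Str.startswith_eq, PySem.Chars.startswith_iff] at h h2
  obtain ⟨u, hu⟩ := h
  obtain ⟨v, hv⟩ := h2
  rw [← hu] at hv
  have := congrArg (List.head?) hv
  simp at this

theorem pv_main : ∀ (L : List String) (nm : String) (b : Option String) (e : String)
    (acc : List (String × Option String)),
    pvFinish (L.foldl pvStepC (some nm, b, e, acc)) =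
      acc ++ pvEmit nm (pvLastValue (L.takeWhile (fun c => !(PySem.Str.startswith c "["))) "baseurl" b)
                      (pvLastStr (L.takeWhile (fun c => !(PySem.Str.startswith c "["))) "enabled" e)
          ++ pvSections (L.dropWhile (fun c => !(PySem.Str.startswith c "[")))
  | [], nm, b, e, acc => by
    simp [pvFinish, pvSections, pvLastValue_nil, pvLastStr_nil]
  | c :: t, nm, b, e, acc => by
    by_cases h0 : (PySem.Str.len c == 0) = true
    · have hc : c = "" := pv_len_zero h0
      subst hc
      rw [List.foldl_cons, show pvStepC (some nm, b, e, acc) "" = (some nm, b, e, acc) from rfl,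
          show List.takeWhile (fun c => !(PySem.Str.startswith c "[")) ("" :: t)
             = "" :: List.takeWhile (fun c => !(PySem.Str.startswith c "[")) t from by
            rw [List.takeWhile_cons_of_pos] ; decide,
          show List.dropWhile (fun c => !(PySem.Str.startswith c "[")) ("" :: t)
             = List.dropWhile (fun c => !(PySem.Str.startswith c "[")) t from by
            rw [List.dropWhile_cons_of_pos] ; decide,
          pvLastValue_cons, pvLastStr_cons,
          show PySem.Str.startswith "" "baseurl" = false from rfl,
          show PySem.Str.startswith "" "enabled" = false from rfl]
      simp only [Bool.false_eq_true, if_false]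
      exact pv_main t nm b e acc
    · have h0' : c ≠ "" := fun hc => h0 (by subst hc; decide)
      by_cases hh : PySem.Str.startswith c "[" = true
      · -- header line
        rw [List.foldl_cons,
            show pvStepC (some nm, b, e, acc) c =
              (some (PySem.Str.slice c (some 1) (some (-1))), none, "1",
               if !(PySem.Str.endswith nm "-source") then
                 if e == "1" then acc ++ [(nm, b)] else acc
               else acc) from by
                 unfold pvStepC; rw [if_neg h0, if_pos hh],
            show List.takeWhile (fun c => !(PySem.Str.startswith c "[")) (c :: t) = [] from by
              rw [List.takeWhile_cons_of_neg]; simpa using hh,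
            show List.dropWhile (fun c => !(PySem.Str.startswith c "[")) (c :: t) = c :: t from by
              rw [List.dropWhile_cons_of_neg]; simpa using hh,
            pv_main t, pv_flush, pvLastValue_nil, pvLastStr_nil,
            show pvSections (c :: t) =
              (if !(PySem.Str.endswith (PySem.Str.slice c (some 1) (some (-1))) "-source") &&
                  (pvLastValue (t.takeWhile (fun c => !(PySem.Str.startswith c "["))) "enabled" (some "1") == some "1") then
                 (PySem.Str.slice c (some 1) (some (-1)),
                  pvLastValue (t.takeWhile (fun c => !(PySem.Str.startswith c "["))) "baseurl" none)
                   :: pvSections (t.dropWhile (fun c => !(PySem.Str.startswith c "[")))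
               else pvSections (t.dropWhile (fun c => !(PySem.Str.startswith c "[")))) from by
              rw [pvSections]]
        rw [pvLastValue_some]
        simp only [pvEmit, List.append_assoc]
        split_ifs <;> simp_all
      · -- body line
        have hq :
            List.takeWhile (fun c => !(PySem.Str.startswith c "[")) (c :: t)
              = c :: List.takeWhile (fun c => !(PySem.Str.startswith c "[")) t := by
          rw [List.takeWhile_cons_of_pos]; simpa using hh
        have hq' :
            List.dropWhile (fun c => !(PySem.Str.startswith c "[")) (c :: t)
              = List.dropWhile (fun c => !(PySem.Str.startswith c "[")) t := by
          rw [List.dropWhile_cons_of_pos]; simpa using hh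
        rw [List.foldl_cons, hq, hq', pvLastValue_cons, pvLastStr_cons]
        by_cases hb : PySem.Str.startswith c "baseurl" = true
        · have he : PySem.Str.startswith c "enabled" = false := pv_disj hb
          rw [show pvStepC (some nm, b, e, acc) c = (some nm, some (pvEqTail c), e, acc) from by
                unfold pvStepC; rw [if_neg h0, if_neg (by simpa using hh), if_pos hb],
              if_pos hb, he]
          simp only [Bool.false_eq_true, if_false]
          exact pv_main t nm (some (pvEqTail c)) e acc
        · by_cases he : PySem.Str.startswith c "enabled" = true
          · rw [show pvStepC (some nm, b, e, acc) c = (some nm, b, pvEqTail c, acc) from by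
                  unfold pvStepC
                  rw [if_neg h0, if_neg (by simpa using hh), if_neg (by simpa using hb), if_pos he],
                if_neg (by simpa using hb), if_pos he]
            exact pv_main t nm b (pvEqTail c) acc
          · rw [show pvStepC (some nm, b, e, acc) c = (some nm, b, e, acc) from by
                  unfold pvStepC
                  rw [if_neg h0, if_neg (by simpa using hh), if_neg (by simpa using hb), if_neg (by simpa using he)],
                if_neg (by simpa using hb), if_neg (by simpa using he)]
            exact pv_main t nm b e acc

theorem pv_pre : ∀ (L : List String) (b : Option String) (e : String),
    pvFinish (L.foldl pvStepC (none, b, e, [])) =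
      pvSections (L.dropWhile (fun c => !(PySem.Str.startswith c "[")))
  | [], b, e => by simp [pvFinish, pvSections]
  | c :: t, b, e => by
    by_cases hh : PySem.Str.startswith c "[" = true
    · have h0 : ¬ (PySem.Str.len c == 0) = true := by
        intro h
        rw [pv_len_zero h] at hh
        exact absurd hh (by decide)
      rw [List.foldl_cons,
          show pvStepC (none, b, e, []) c =
            (some (PySem.Str.slice c (some 1) (some (-1))), none, "1", []) from by
              unfold pvStepC; rw [if_neg h0, if_pos hh],
          show List.dropWhile (fun c => !(PySem.Str.startswith c "[")) (c :: t) = c :: t from by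
            rw [List.dropWhile_cons_of_neg]; simpa using hh,
          pv_main t,
          show pvSections (c :: t) =
            (if !(PySem.Str.endswith (PySem.Str.slice c (some 1) (some (-1))) "-source") &&
                (pvLastValue (t.takeWhile (fun c => !(PySem.Str.startswith c "["))) "enabled" (some "1") == some "1") then
               (PySem.Str.slice c (some 1) (some (-1)),
                pvLastValue (t.takeWhile (fun c => !(PySem.Str.startswith c "["))) "baseurl" none)
                 :: pvSections (t.dropWhile (fun c => !(PySem.Str.startswith c "[")))
             else pvSections (t.dropWhile (fun c => !(PySem.Str.startswith c "[")))) from by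
            rw [pvSections]]
      rw [pvLastValue_some]
      simp only [pvEmit, List.nil_append]
      split_ifs <;> simp_all
    · rw [List.foldl_cons,
          show List.dropWhile (fun c => !(PySem.Str.startswith c "[")) (c :: t)
             = List.dropWhile (fun c => !(PySem.Str.startswith c "[")) t from by
            rw [List.dropWhile_cons_of_pos]; simpa using hh]
      have hst : ∃ b' e', pvStepC (none, b, e, []) c = (none, b', e', []) := by
        by_cases h0 : (PySem.Str.len c == 0) = true
        · exact ⟨b, e, by unfold pvStepC; rw [if_pos h0]⟩
        · by_cases hb : PySem.Str.startswith c "baseurl" = true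
          · exact ⟨some (pvEqTail c), e, by
              unfold pvStepC; rw [if_neg h0, if_neg (by simpa using hh), if_pos hb]⟩
          · by_cases he : PySem.Str.startswith c "enabled" = true
            · exact ⟨b, pvEqTail c, by
                unfold pvStepC
                rw [if_neg h0, if_neg (by simpa using hh), if_neg (by simpa using hb), if_pos he]⟩
            · exact ⟨b, e, by
                unfold pvStepC
                rw [if_neg h0, if_neg (by simpa using hh), if_neg (by simpa using hb),
                    if_neg (by simpa using he)]⟩
      obtain ⟨b', e', hst⟩ := hst
      rw [hst]
      exact pv_pre t b' e'

theorem pv_foldA (data : List String) (st : pvStateA) :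
    data.foldl pvStepA st = (data.map pvClean).foldl pvStepC st := by
  rw [List.foldl_map]
  rfl

theorem pv_filter : ∀ (l : List String) (st : pvStateA),
    l.foldl pvStepC st = (l.filter (fun c => c ≠ "")).foldl pvStepC st
  | [], st => rfl
  | c :: t, st => by
    by_cases hc : c = ""
    · subst hc
      rw [List.foldl_cons, show pvStepC st "" = st from by unfold pvStepC; rw [if_pos (by decide)],
          List.filter_cons_of_neg (by simp)]
      exact pv_filter t st
    · rw [List.foldl_cons, List.filter_cons_of_pos (by simp [hc]), List.foldl_cons]
      exact pv_filter t (pvStepC st c)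

theorem pv_finish_st (st : pvStateA) :
    (match st.1 with
     | some name =>
        if !(PySem.Str.endswith name "-source") then
          if st.2.2.1 == "1" then st.2.2.2 ++ [(name, st.2.1)] else st.2.2.2
        else st.2.2.2
     | none => st.2.2.2) = pvFinish st := by
  obtain ⟨nm, b, e, r⟩ := st
  cases nm with
  | none => rfl
  | some name => exact pv_flush name b e r

theorem pv_spec_all (data : List String) :
    parseRPMSources data = parseRPMSources_alt data := by
  unfold parseRPMSources parseRPMSources_alt
  rw [pv_finish_st, pv_foldA, pv_filter]
  exact pv_pre _ none "1"

-- ===== VERDICT (by name: the statement is the Claim_ definition above) =====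
theorem parseRPMSources_spec : Claim_equal_parseRPMSources := by
  intro data _ _
  unfold Spec_parseRPMSources
  exact pv_spec_all data
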